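-- pv_equiv track=rewrite | github.com/laumiulun/Sabcor | py/num_fields.py | num_fields
-- ===== SOURCE A (Python) =====
-- def num_fields(ascii_line):
--     """
--     Determines the number of separate fields in an ASCII line.
--     Fields are separated by spaces, commas, or tabs.
--
--     Parameters:
--     ascii_line (str): The input ASCII line as a string.
--
--     Returns:
--     int: The number of separate fields in the line.
--     """
--     itemp = 0
--     new = True  # Indicates if the previous character was a delimiter
--     delimiters = {' ', ',', '\t'}  # Set of delimiter characters
--
--     for char in ascii_line:
--         if char in delimiters:
--             new = True
--         else:
--             if new:
--                 itemp += 1  # Increment field count at the start of a new field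
--             new = False  # We are inside a field
--
--     return itemp
-- ===== SOURCE B (Python) =====
-- def num_fields(ascii_line):
--     """Count fields by jumping over whole runs: skip a delimiter, or count
--     one field and consume its entire non-delimiter run in an inner loop."""
--     delims = ' ,\t'
--     n = len(ascii_line)
--     i = 0
--     count = 0
--     while i < n:
--         if ascii_line[i] in delims:
--             i += 1
--         else:
--             count += 1
--             while i < n and ascii_line[i] not in delims:
--                 i += 1
--     return count
-- ===== Notes on version B (the rewrite author's own statement) =====
-- stated objective: alternative
-- what changed: B drops the boolean was-previous-char-a-delimiter flag A carries through its scan and instead walks the line run by run: it counts a field and consumes its whole non-delimiter run in an inner loop, skipping delimiters one at a time.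
import Mathlib
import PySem

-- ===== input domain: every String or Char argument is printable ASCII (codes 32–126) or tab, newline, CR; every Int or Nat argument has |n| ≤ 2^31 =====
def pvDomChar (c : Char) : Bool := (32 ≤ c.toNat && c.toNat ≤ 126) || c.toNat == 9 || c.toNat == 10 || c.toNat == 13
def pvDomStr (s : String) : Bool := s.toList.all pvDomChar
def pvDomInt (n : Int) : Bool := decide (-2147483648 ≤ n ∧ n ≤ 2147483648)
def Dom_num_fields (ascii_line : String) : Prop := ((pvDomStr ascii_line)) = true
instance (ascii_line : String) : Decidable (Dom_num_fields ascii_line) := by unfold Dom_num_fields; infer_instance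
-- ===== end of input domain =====

-- B replaces A's boolean delimiter flag by a run-skipping scan (count a field, consume its
-- whole run); same O(n) cost, alternative structure. Proved equal on all inputs.

-- ===== PORT A =====
def pvIsDelim (c : Char) : Bool := c = ' ' || c = ',' || c = '\t'

-- A: fold over the characters with state (itemp, new)
def num_fields (ascii_line : String) : Int :=
  (ascii_line.toList.foldl
    (fun st char =>
      if pvIsDelim char then (st.1, true)
      else ((if st.2 then st.1 + 1 else st.1), false))
    ((0 : Int), true)).1

-- ===== PORT B =====
-- B: run-skipping recursion — skip one delimiter, or count a field and drop its whole run
def pvCountRuns : List Char → Int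
  | [] => 0
  | c :: cs =>
    if pvIsDelim c then pvCountRuns cs
    else 1 + pvCountRuns (cs.dropWhile (fun d => !pvIsDelim d))
  termination_by l => l.length
  decreasing_by
    · simp
    · exact Nat.lt_succ_of_le (List.length_dropWhile_le _ _)

def num_fields_alt (ascii_line : String) : Int := pvCountRuns ascii_line.toList

-- ===== PRECONDITION & SPEC =====
def Spec_num_fields (ascii_line : String) (out : Int) : Prop := out = num_fields_alt ascii_line
instance (ascii_line : String) (out : Int) : Decidable (Spec_num_fields ascii_line out) := by unfold Spec_num_fields; infer_instance

-- ===== CLAIM (what is proved, stated in full; the proofs are below) =====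
def Claim_equal_num_fields : Prop := ∀ (ascii_line : String), Dom_num_fields ascii_line → Spec_num_fields ascii_line (num_fields ascii_line)

-- ===== LEMMAS AND PROOFS =====

-- Invariant of A's fold: with flag true it adds pvCountRuns l to the accumulator;
-- with flag false the current run is already counted, so the run's remainder is dropped.
theorem pv_loop_inv (l : List Char) : ∀ (n : Int),
    (l.foldl (fun st char =>
        if pvIsDelim char then (st.1, true)
        else ((if st.2 then st.1 + 1 else st.1), false)) (n, true)).1
      = n + pvCountRuns l
  ∧ (l.foldl (fun st char =>
        if pvIsDelim char then (st.1, true)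
        else ((if st.2 then st.1 + 1 else st.1), false)) (n, false)).1
      = n + pvCountRuns (l.dropWhile (fun d => !pvIsDelim d)) := by
  induction l with
  | nil => intro n; simp [pvCountRuns]
  | cons c cs ih =>
    intro n
    by_cases h : pvIsDelim c = true
    · constructor
      · rw [List.foldl_cons]
        simp only [h, if_true]
        rw [pvCountRuns, if_pos h]
        exact (ih n).1
      · rw [List.foldl_cons]
        simp only [h, if_true]
        rw [List.dropWhile_cons, h]
        simp only [Bool.not_true, Bool.false_eq_true, if_false]
        rw [pvCountRuns, if_pos h]
        exact (ih n).1
    · constructor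
      · rw [List.foldl_cons]
        rw [if_neg h]
        simp only [if_true]
        rw [pvCountRuns, if_neg h]
        rw [(ih (n + 1)).2]
        ring
      · rw [List.foldl_cons]
        rw [if_neg h]
        simp only [Bool.false_eq_true, reduceIte]
        rw [List.dropWhile_cons]
        simp only [h, Bool.not_false, if_true]
        exact (ih n).2

-- ===== VERDICT (by name: the statement is the Claim_ definition above) =====
theorem num_fields_spec : Claim_equal_num_fields := by
  intro s _
  unfold Spec_num_fields num_fields num_fields_alt
  simpa using (pv_loop_inv s.toList 0).1
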